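-- pv_equiv track=rewrite | github.com/dem-v/goitneo-python-MCS3-team8-darkcoders | BlackBook/classes/helper_methods.py | split_phones
-- ===== SOURCE A (Python) =====
-- def split_phones(phone_string):
--     if phone_string is None or len(phone_string) < 2:
--         return []
--
--     splitted = phone_string.split()
--     phones = []
--     for s in splitted:
--         phones.extend(s.split(","))
--
--     phones = [phone.strip() for phone in phones if phone.strip()]
--
--     return phones
-- ===== SOURCE B (Python) =====
-- def split_phones(phone_string):
--     if phone_string is None or len(phone_string) < 2:
--         return []
--     tokens = []
--     cur = []
--     for ch in phone_string:
--         if ch == ',' or ch.isspace():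
--             if cur:
--                 tokens.append(''.join(cur))
--                 cur = []
--         else:
--             cur.append(ch)
--     if cur:
--         tokens.append(''.join(cur))
--     return tokens
-- ===== Notes on version B (the rewrite author's own statement) =====
-- stated objective: alternative
-- what changed: Replaces the two-level split (whitespace split, then per-word comma split, then strip+filter comprehension) with a single left-to-right character scan that treats commas and whitespace uniformly as delimiters and flushes the current token, so no split/strip calls and no intermediate word lists remain.
import Mathlib
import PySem

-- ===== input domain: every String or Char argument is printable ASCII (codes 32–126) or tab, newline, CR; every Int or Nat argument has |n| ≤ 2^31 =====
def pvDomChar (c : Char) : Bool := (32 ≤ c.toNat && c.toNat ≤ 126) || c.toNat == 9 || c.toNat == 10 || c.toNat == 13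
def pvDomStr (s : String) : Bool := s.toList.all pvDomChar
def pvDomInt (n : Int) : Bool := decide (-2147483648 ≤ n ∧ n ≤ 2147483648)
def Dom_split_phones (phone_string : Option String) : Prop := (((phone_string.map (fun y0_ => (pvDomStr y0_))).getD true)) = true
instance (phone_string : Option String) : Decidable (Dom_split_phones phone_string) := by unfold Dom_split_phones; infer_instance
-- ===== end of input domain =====

-- B replaces A's split/split(",")/strip pipeline with a single character scan; same results, same cost (objective: alternative).

-- ===== PORT A =====
def split_phones (phone_string : Option String) : List String :=
  match phone_string with
  | none => []
  | some s =>
    if PySem.Str.len s < 2 then []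
    else
      let splitted := PySem.Chars.split₀ s.toList
      let phones := splitted.foldl (fun acc t => acc ++ PySem.Chars.splitOn t [',']) []
      (phones.filterMap (fun p =>
        if (PySem.Chars.strip p).isEmpty then none else some (PySem.Chars.strip p))).map String.ofList

-- ===== PORT B =====
-- single pass: flush the current token at ',' or whitespace, append it to the output
def tokGo : List Char → List Char → List String → List String
  | [], cur, acc => if cur.isEmpty then acc else acc ++ [String.ofList cur]
  | c :: rest, cur, acc =>
    if c = ',' || PySem.Chars.isspace c then
      if cur.isEmpty then tokGo rest [] acc else tokGo rest [] (acc ++ [String.ofList cur])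
    else tokGo rest (cur ++ [c]) acc

def split_phones_alt (phone_string : Option String) : List String :=
  match phone_string with
  | none => []
  | some s =>
    if PySem.Str.len s < 2 then []
    else tokGo s.toList [] []

-- ===== PRECONDITION & SPEC =====
def Spec_split_phones (phone_string : Option String) (out : List String) : Prop := out = split_phones_alt phone_string
instance (phone_string : Option String) (out : List String) : Decidable (Spec_split_phones phone_string out) := by unfold Spec_split_phones; infer_instance

-- ===== CLAIM (what is proved, stated in full; the proofs are below) =====
def Claim_equal_split_phones : Prop := ∀ (phone_string : Option String), Dom_split_phones phone_string → Spec_split_phones phone_string (split_phones phone_string)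

-- ===== LEMMAS AND PROOFS =====

-- simple structural presentation of Python's s.split(",")
def commaSplit : List Char → List (List Char)
  | [] => [[]]
  | c :: rest =>
    if c = ',' then [] :: commaSplit rest
    else
      match commaSplit rest with
      | [] => [[c]]
      | p :: ps => (c :: p) :: ps

theorem commaSplit_ne_nil (cs : List Char) : commaSplit cs ≠ [] := by
  induction cs with
  | nil => simp [commaSplit]
  | cons c rest ih =>
    simp only [commaSplit]
    split
    · simp
    · cases h : commaSplit rest <;> simp

-- splitOn.go computed in terms of commaSplit
theorem splitOn_go_eq (fuel : Nat) : ∀ (l cur : List Char) (acc : List (List Char)),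
    l.length ≤ fuel →
    PySem.Chars.splitOn.go [','] fuel l cur acc =
      acc.reverse ++ (match commaSplit l with
        | [] => []
        | p :: ps => (cur.reverse ++ p) :: ps) := by
  induction fuel with
  | zero =>
    intro l cur acc h
    have : l = [] := List.eq_nil_of_length_eq_zero (Nat.le_zero.mp h)
    subst this
    simp [PySem.Chars.splitOn.go, commaSplit]
  | succ fuel ih =>
    intro l cur acc h
    cases l with
    | nil => simp [PySem.Chars.splitOn.go, commaSplit]
    | cons c rest =>
      by_cases hc : c = ','
      · subst hc
        rw [show PySem.Chars.splitOn.go [','] (fuel+1) (',' :: rest) cur acc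
              = PySem.Chars.splitOn.go [','] fuel rest [] (cur.reverse :: acc) by
            simp [PySem.Chars.splitOn.go, List.isPrefixOf]]
        rw [ih rest [] (cur.reverse :: acc) (by simpa using Nat.lt_succ_iff.mp (by simpa using h))]
        cases hr : commaSplit rest with
        | nil => exact absurd hr (commaSplit_ne_nil rest)
        | cons p ps => simp [commaSplit, hr]
      · rw [show PySem.Chars.splitOn.go [','] (fuel+1) (c :: rest) cur acc
              = PySem.Chars.splitOn.go [','] fuel rest (c :: cur) acc by
            simp [PySem.Chars.splitOn.go, List.isPrefixOf, Ne.symm hc]]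
        rw [ih rest (c :: cur) acc (by simpa using Nat.lt_succ_iff.mp (by simpa using h))]
        cases hr : commaSplit rest with
        | nil => exact absurd hr (commaSplit_ne_nil rest)
        | cons p ps => simp [commaSplit, hr, hc]

theorem splitOn_eq_commaSplit (cs : List Char) :
    PySem.Chars.splitOn cs [','] = commaSplit cs := by
  rw [PySem.Chars.splitOn, splitOn_go_eq (cs.length + 1) cs [] [] (Nat.le_succ _)]
  cases hr : commaSplit cs with
  | nil => exact absurd hr (commaSplit_ne_nil cs)
  | cons p ps => simp

-- snoc behaviour of commaSplit
theorem snoc_inj {α : Type} {l1 l2 : List α} {x y : α} (h : l1 ++ [x] = l2 ++ [y]) :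
    l1 = l2 ∧ x = y := by
  have h2 := List.append_inj' h rfl
  exact ⟨h2.1, by simpa using h2.2⟩

theorem commaSplit_snoc (w : List Char) (c : Char) : ∀ (P : List (List Char)) (p : List Char),
    commaSplit w = P ++ [p] →
    commaSplit (w ++ [c]) = if c = ',' then P ++ [p] ++ [[]] else P ++ [p ++ [c]] := by
  induction w with
  | nil =>
    intro P p h
    have h' : ([] : List (List Char)) ++ [([] : List Char)] = P ++ [p] := by
      simpa [commaSplit] using h
    obtain ⟨hP, hp⟩ := snoc_inj h'
    subst hP; subst hp
    by_cases hc : c = ','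
    · simp [commaSplit, hc]
    · simp [commaSplit, hc]
  | cons d rest ih =>
    intro P p h
    obtain ⟨Q, q, hQ⟩ : ∃ Q q, commaSplit rest = Q ++ [q] := by
      rcases List.eq_nil_or_concat (commaSplit rest) with hn | ⟨Q, q, hQ⟩
      · exact absurd hn (commaSplit_ne_nil rest)
      · exact ⟨Q, q, by simpa using hQ⟩
    have hrec := ih Q q hQ
    by_cases hd : d = ','
    · subst hd
      have hw : commaSplit (',' :: rest) = ([] :: Q) ++ [q] := by simp [commaSplit, hQ]
      obtain ⟨hP, hp⟩ := snoc_inj (hw.symm.trans h)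
      subst hp
      rw [← hP]
      show commaSplit (',' :: (rest ++ [c])) = _
      simp only [commaSplit, hrec]
      by_cases hc : c = ',' <;> simp [hc]
    · cases Q with
      | nil =>
        have hw : commaSplit (d :: rest) = ([] : List (List Char)) ++ [d :: q] := by
          simp [commaSplit, hd, hQ]
        obtain ⟨hP, hp⟩ := snoc_inj (hw.symm.trans h)
        subst hp
        rw [← hP]
        show commaSplit (d :: (rest ++ [c])) = _
        simp only [commaSplit, if_neg hd, hrec]
        by_cases hc : c = ',' <;> simp [hc]
      | cons a as =>
        have hw : commaSplit (d :: rest) = ((d :: a) :: as) ++ [q] := by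
          simp [commaSplit, hd, hQ]
        obtain ⟨hP, hp⟩ := snoc_inj (hw.symm.trans h)
        subst hp
        rw [← hP]
        show commaSplit (d :: (rest ++ [c])) = _
        simp only [commaSplit, if_neg hd, hrec]
        by_cases hc : c = ',' <;> simp [hc]

-- non-space characterisations
def nb (c : Char) : Bool := !PySem.Chars.isspace c

theorem strip_of_nonspace (cs : List Char) (h : cs.all nb) : PySem.Chars.strip cs = cs := by
  have hl : PySem.Chars.lstrip cs = cs := by
    rw [PySem.Chars.lstrip, List.dropWhile_eq_self_iff]
    intro hc
    have := List.all_eq_true.mp h _ (List.getElem_mem hc)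
    simpa [nb] using this
  have hr : PySem.Chars.rstrip cs = cs := by
    rw [PySem.Chars.rstrip]
    have hd : List.dropWhile PySem.Chars.isspace cs.reverse = cs.reverse := by
      rw [List.dropWhile_eq_self_iff]
      intro hc
      have hmem : cs.reverse[0] ∈ cs.reverse := List.getElem_mem hc
      have := List.all_eq_true.mp h _ (List.mem_reverse.mp hmem)
      simpa [nb] using this
    rw [hd, List.reverse_reverse]
  rw [PySem.Chars.strip, hl, hr]

theorem commaSplit_nonspace (w : List Char) (h : w.all nb) :
    ∀ p ∈ commaSplit w, p.all nb := by
  induction w with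
  | nil => intro p hp; simp [commaSplit] at hp; simp [hp]
  | cons c rest ih =>
    simp only [List.all_cons, Bool.and_eq_true] at h
    intro p hp
    simp only [commaSplit] at hp
    split at hp
    · rcases List.mem_cons.mp hp with hp1 | hp1
      · simp [hp1]
      · exact ih h.2 p hp1
    · cases hr : commaSplit rest with
      | nil => exact absurd hr (commaSplit_ne_nil rest)
      | cons a as =>
        rw [hr] at hp
        rcases List.mem_cons.mp hp with hp1 | hp1
        · subst hp1
          have := ih h.2 a (by rw [hr]; exact List.mem_cons_self)
          simp [List.all_cons, h.1, this]
        · exact ih h.2 p (by rw [hr]; exact List.mem_cons.mpr (Or.inr hp1))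

theorem split₀_go_nonspace : ∀ (s cur : List Char) (acc : List (List Char)),
    cur.all nb → (∀ t ∈ acc, t.all nb) →
    ∀ t ∈ PySem.Chars.split₀.go s cur acc, t.all nb := by
  intro s
  induction s with
  | nil =>
    intro cur acc hcur hacc t ht
    simp only [PySem.Chars.split₀.go] at ht
    split at ht
    · exact hacc t (by simpa using ht)
    · simp only [List.reverse_cons] at ht
      rcases List.mem_append.mp ht with ht1 | ht1
      · exact hacc t (List.mem_reverse.mp ht1)
      · have htc : t = cur.reverse := by simpa using ht1
        subst htc; simpa using hcur
  | cons c rest ih =>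
    intro cur acc hcur hacc t ht
    by_cases hsp : PySem.Chars.isspace c
    · simp only [PySem.Chars.split₀.go, hsp, if_pos] at ht
      split at ht
      · exact ih [] acc (by simp) hacc t ht
      · refine ih [] (cur.reverse :: acc) (by simp) ?_ t ht
        intro u hu
        rcases List.mem_cons.mp hu with hu1 | hu1
        · subst hu1; simpa using hcur
        · exact hacc u hu1
    · simp only [PySem.Chars.split₀.go, hsp] at ht
      refine ih (c :: cur) acc ?_ hacc t ht
      simp [List.all_cons, nb, hsp, hcur]

-- pieces filter
def pvFilt (l : List (List Char)) : List (List Char) := l.filter (fun p => !p.isEmpty)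

theorem filterMap_strip_eq_filter (l : List (List Char)) (h : ∀ p ∈ l, p.all nb) :
    l.filterMap (fun p =>
      if (PySem.Chars.strip p).isEmpty then none else some (PySem.Chars.strip p)) = pvFilt l := by
  induction l with
  | nil => simp [pvFilt]
  | cons p rest ih =>
    have hp : PySem.Chars.strip p = p := strip_of_nonspace p (h p List.mem_cons_self)
    have hrest := ih fun q hq => h q (List.mem_cons_of_mem _ hq)
    rw [List.filterMap_cons, hp]
    by_cases he : p.isEmpty
    · rw [if_pos he, hrest]
      simp [pvFilt, he]
    · rw [if_neg he, hrest]
      simp [pvFilt, he]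

-- the A-side pipeline on a go-state
def pvA (s curA : List Char) (accA : List (List Char)) : List String :=
  (pvFilt ((PySem.Chars.split₀.go s curA accA).flatMap commaSplit)).map String.ofList

theorem pvFilt_append (a b : List (List Char)) : pvFilt (a ++ b) = pvFilt a ++ pvFilt b :=
  List.filter_append ..

-- MAIN invariant: the scanner equals A's pipeline from corresponding states
theorem tokGo_eq_pvA : ∀ (s curA : List Char) (accA : List (List Char))
    (P : List (List Char)) (p : List Char),
    commaSplit curA.reverse = P ++ [p] →
    tokGo s p ((pvFilt (accA.reverse.flatMap commaSplit) ++ pvFilt P).map String.ofList)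
      = pvA s curA accA := by
  intro s
  induction s with
  | nil =>
    intro curA accA P p hP
    by_cases hcur : curA = []
    · subst hcur
      have h' : ([] : List (List Char)) ++ [([] : List Char)] = P ++ [p] := by
        simpa [commaSplit] using hP
      obtain ⟨h1, h2⟩ := snoc_inj h'
      subst h1; subst h2
      simp [tokGo, pvA, PySem.Chars.split₀.go, pvFilt]
    · have hgo : PySem.Chars.split₀.go [] curA accA = accA.reverse ++ [curA.reverse] := by
        simp [PySem.Chars.split₀.go, hcur]
      simp only [pvA, hgo, List.flatMap_append, pvFilt_append]
      have hP1 : (List.flatMap commaSplit [curA.reverse]) = P ++ [p] := by simp [hP]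
      rw [hP1, pvFilt_append]
      by_cases hp : p.isEmpty
      · have h2 : pvFilt [p] = [] := by simp [pvFilt, hp]
        simp [tokGo, h2, hp]
      · have h2 : pvFilt [p] = [p] := by simp [pvFilt, hp]
        simp [tokGo, h2, hp]
  | cons c rest ih =>
    intro curA accA P p hP
    by_cases hc : c = ','
    · subst hc
      have hsp : PySem.Chars.isspace ',' = false := by decide
      have hA : pvA (',' :: rest) curA accA = pvA rest (',' :: curA) accA := by
        simp [pvA, PySem.Chars.split₀.go, hsp]
      have hsnoc : commaSplit ((',' :: curA).reverse) = (P ++ [p]) ++ [[]] := by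
        rw [List.reverse_cons]
        simpa using commaSplit_snoc curA.reverse ',' P p hP
      have hih := ih (',' :: curA) accA (P ++ [p]) [] hsnoc
      rw [hA, ← hih]
      have hPp : pvFilt (P ++ [p]) = pvFilt P ++ pvFilt [p] := pvFilt_append _ _
      by_cases hp : p.isEmpty
      · have h2 : pvFilt [p] = [] := by simp [pvFilt, hp]
        simp [tokGo, hp, hPp, h2]
      · have h2 : pvFilt [p] = [p] := by simp [pvFilt, hp]
        simp [tokGo, hp, hPp, h2]
    · by_cases hsp : PySem.Chars.isspace c
      · by_cases hcur : curA = []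
        · subst hcur
          have h' : ([] : List (List Char)) ++ [([] : List Char)] = P ++ [p] := by
            simpa [commaSplit] using hP
          obtain ⟨h1, h2⟩ := snoc_inj h'
          subst h1; subst h2
          have hA : pvA (c :: rest) [] accA = pvA rest [] accA := by
            simp [pvA, PySem.Chars.split₀.go, hsp]
          have hih := ih [] accA [] [] (by simp [commaSplit])
          rw [hA, ← hih]
          simp [tokGo, hc, hsp, pvFilt]
        · have hA : pvA (c :: rest) curA accA = pvA rest [] (curA.reverse :: accA) := by
            simp [pvA, PySem.Chars.split₀.go, hsp, hcur]
          have hacc : (curA.reverse :: accA).reverse.flatMap commaSplit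
              = accA.reverse.flatMap commaSplit ++ (P ++ [p]) := by
            simp [List.flatMap_append, hP]
          have hih := ih [] (curA.reverse :: accA) [] [] (by simp [commaSplit])
          rw [hA, ← hih, hacc, pvFilt_append, pvFilt_append]
          by_cases hp : p.isEmpty
          · have h2 : pvFilt [p] = [] := by simp [pvFilt, hp]
            simp [tokGo, hc, hsp, hp, pvFilt]
          · have h2 : pvFilt [p] = [p] := by simp [pvFilt, hp]
            simp [tokGo, hc, hsp, hp, pvFilt]
      · -- ordinary character
        have hA : pvA (c :: rest) curA accA = pvA rest (c :: curA) accA := by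
          simp [pvA, PySem.Chars.split₀.go, hsp]
        have hsnoc : commaSplit ((c :: curA).reverse) = P ++ [p ++ [c]] := by
          rw [List.reverse_cons]
          simpa [hc] using commaSplit_snoc curA.reverse c P p hP
        have hih := ih (c :: curA) accA P (p ++ [c]) hsnoc
        rw [hA, ← hih]
        simp [tokGo, hc, hsp]

-- ===== VERDICT (by name: the statement is the Claim_ definition above) =====
theorem split_phones_spec : Claim_equal_split_phones := by
  intro o _
  unfold Spec_split_phones
  match o with
  | none => rfl
  | some s =>
    by_cases hlen : PySem.Str.len s < 2
    · simp only [split_phones, split_phones_alt, if_pos hlen]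
    · simp only [split_phones, split_phones_alt, if_neg hlen]
      rw [PySem.List.foldl_append_eq_flatMap, List.nil_append]
      have hflat : List.flatMap (fun t => PySem.Chars.splitOn t [',']) (PySem.Chars.split₀ s.toList)
          = List.flatMap commaSplit (PySem.Chars.split₀ s.toList) := by
        apply List.flatMap_congr
        intro t _
        exact splitOn_eq_commaSplit t
      rw [hflat]
      have hns : ∀ q ∈ List.flatMap commaSplit (PySem.Chars.split₀ s.toList), q.all nb := by
        intro q hq
        rw [List.mem_flatMap] at hq
        obtain ⟨t, ht, hqt⟩ := hq
        have htns : t.all nb :=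
          split₀_go_nonspace s.toList [] [] (by simp) (by simp) t ht
        exact commaSplit_nonspace t htns q hqt
      rw [filterMap_strip_eq_filter _ hns]
      have htok := tokGo_eq_pvA s.toList [] [] [] [] (by simp [commaSplit])
      simp only [pvFilt, List.filter_nil, List.map_nil, List.reverse_nil, List.flatMap_nil,
        List.append_nil] at htok
      rw [htok]
      rfl
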